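-- pv_equiv track=rewrite | github.com/AbdallahAboelhamd/Task-Manager | remove_comments.py | strip_c_comments
-- ===== SOURCE A (Python) =====
-- def strip_c_comments(text):
--
--     out = []
--
--     i = 0
--
--     n = len(text)
--
--     state = None
--
--     quote = None
--
--     escaped = False
--
--     while i < n:
--
--         ch = text[i]
--
--         nxt = text[i + 1] if i + 1 < n else ''
--
--         if state == 'string':
--
--             out.append(ch)
--
--             if escaped:
--
--                 escaped = False
--
--             elif ch == '\\':
--
--                 escaped = True
--
--             elif ch == quote:
--
--                 state = None
--
--             i += 1
--
--             continue
--
--         if state == 'line_comment':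
--
--             if ch == '\n':
--
--                 out.append(ch)
--
--                 state = None
--
--             i += 1
--
--             continue
--
--         if state == 'block_comment':
--
--             if ch == '*' and nxt == '/':
--
--                 state = None
--
--                 i += 2
--
--                 continue
--
--             i += 1
--
--             continue
--
--         if ch in ('"', "'"):
--
--             state = 'string'
--
--             quote = ch
--
--             out.append(ch)
--
--             i += 1
--
--             continue
--
--         if ch == '/' and nxt == '*':
--
--             state = 'block_comment'
--
--             i += 2
--
--             continue
--
--         if ch == '/' and nxt == '/':
--
--             state = 'line_comment'
--
--             i += 2
--
--             continue
--
--         out.append(ch)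
--
--         i += 1
--
--     return ''.join(out)
-- ===== SOURCE B (Python) =====
-- def strip_c_comments(text):
--     out = []
--     i = 0
--     n = len(text)
--     while i < n:
--         ch = text[i]
--         if ch in '"\'':
--             # string literal: scan to its closing quote, honouring backslash escapes
--             j = i + 1
--             while j < n:
--                 if text[j] == '\\':
--                     j += 2
--                 elif text[j] == ch:
--                     j += 1
--                     break
--                 else:
--                     j += 1
--             out.append(text[i:j])
--             i = j
--         elif text.startswith('//', i):
--             k = text.find('\n', i + 2)
--             i = n if k < 0 else k  # keep the newline itself
--         elif text.startswith('/*', i):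
--             k = text.find('*/', i + 2)
--             i = n if k < 0 else k + 2
--         else:
--             out.append(ch)
--             i += 1
--     return ''.join(out)
-- ===== Notes on version B (the rewrite author's own statement) =====
-- stated objective: alternative
-- what changed: Replaced A's per-character state machine (state/quote/escaped flags threaded through one big loop) by a chunk-jumping scanner: string literals are copied wholesale by a dedicated escape-aware sub-scan, and each comment is skipped in one jump by searching for its terminator with str.find; no mode state is maintained across iterations.
import Mathlib
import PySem

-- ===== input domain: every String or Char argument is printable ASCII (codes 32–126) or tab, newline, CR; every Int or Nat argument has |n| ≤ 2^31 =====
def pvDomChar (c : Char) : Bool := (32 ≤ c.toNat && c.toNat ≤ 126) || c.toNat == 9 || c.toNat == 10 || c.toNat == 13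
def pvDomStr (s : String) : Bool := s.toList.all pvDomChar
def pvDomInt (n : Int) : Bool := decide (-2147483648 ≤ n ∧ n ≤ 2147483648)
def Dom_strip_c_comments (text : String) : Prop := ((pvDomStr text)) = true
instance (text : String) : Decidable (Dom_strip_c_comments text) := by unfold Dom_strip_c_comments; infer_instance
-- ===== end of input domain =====

-- B replaces A's per-character state machine by a chunk-jumping scanner (alternative decomposition, same O(n) cost).

-- ===== PORT A =====
-- A's `state` variable (None / 'string' / 'line_comment' / 'block_comment')
inductive AState
  | none | str | line | block
deriving DecidableEq

-- A's while-loop: one recursive step per iteration; `quote` is Option Char as in Python (None initially).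
def stripALoop : List Char → AState → Option Char → Bool → List Char
  | [], _, _, _ => []
  | ch :: rest, st, quote, escaped =>
    match st with
    | .str =>
      if escaped then ch :: stripALoop rest .str quote false
      else if ch = '\\' then ch :: stripALoop rest .str quote true
      else if some ch = quote then ch :: stripALoop rest .none quote escaped
      else ch :: stripALoop rest .str quote escaped
    | .line =>
      if ch = '\n' then ch :: stripALoop rest .none quote escaped
      else stripALoop rest .line quote escaped
    | .block =>
      if ch = '*' ∧ rest.head? = some '/' then stripALoop rest.tail .none quote escaped
      else stripALoop rest .block quote escaped
    | .none =>
      if ch = '"' ∨ ch = '\'' then ch :: stripALoop rest .str (some ch) false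
      else if ch = '/' ∧ rest.head? = some '*' then stripALoop rest.tail .block quote escaped
      else if ch = '/' ∧ rest.head? = some '/' then stripALoop rest.tail .line quote escaped
      else ch :: stripALoop rest .none quote escaped
termination_by l => l.length
decreasing_by all_goals simp_all [List.length_tail]; try omega

def strip_c_comments (text : String) : String :=
  String.ofList (stripALoop text.toList AState.none Option.none false)

-- ===== PORT B =====
-- B's inner string scan: returns (the literal's chars after the opening quote, the remaining text).
def scanString : List Char → Char → List Char × List Char
  | [], _ => ([], [])
  | c :: rest, q =>
    if c = '\\' then
      match rest with
      | [] => ([c], [])                    -- j += 2 runs past the end: slice keeps the backslash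
      | d :: rest' =>
        match scanString rest' q with
        | (s, r) => (c :: d :: s, r)
    else if c = q then ([c], rest)
    else
      match scanString rest q with
      | (s, r) => (c :: s, r)

theorem scanString_snd_length_le (l : List Char) (q : Char) : (scanString l q).2.length ≤ l.length := by
  fun_induction scanString l q <;> simp_all <;> omega

-- B's `text.find('*/', i+2)` jump: drop through the first "*/" (everything if none).
def dropBlock : List Char → List Char
  | [] => []
  | c :: rest =>
    if c = '*' ∧ rest.head? = some '/' then rest.tail
    else dropBlock rest

theorem dropBlock_length_le (l : List Char) : (dropBlock l).length ≤ l.length := by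
  induction l with
  | nil => simp [dropBlock]
  | cons c rest ih =>
    simp only [dropBlock]
    split
    · simp [List.length_tail]; omega
    · exact le_trans ih (by simp)

-- B's main loop: one step per copied character or per skipped chunk.
def stripBLoop : List Char → List Char
  | [] => []
  | c :: rest =>
    if c = '"' ∨ c = '\'' then
      c :: ((scanString rest c).1 ++ stripBLoop (scanString rest c).2)
    else if c = '/' ∧ rest.head? = some '/' then
      stripBLoop (rest.tail.dropWhile (· ≠ '\n'))   -- text.find('\n', …): keep the newline
    else if c = '/' ∧ rest.head? = some '*' then
      stripBLoop (dropBlock rest.tail)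
    else
      c :: stripBLoop rest
termination_by l => l.length
decreasing_by
  · have := scanString_snd_length_le rest c; simp; omega
  · have h1 := List.length_dropWhile_le (p := fun x => !decide (x = '\n')) (l := rest.tail)
    have h2 : rest.tail.length ≤ rest.length := by simp [List.length_tail]
    simp; omega
  · have h1 := dropBlock_length_le rest.tail
    have h2 : rest.tail.length ≤ rest.length := by simp [List.length_tail]
    simp; omega
  · simp

def strip_c_comments_alt (text : String) : String :=
  String.ofList (stripBLoop text.toList)

-- ===== PRECONDITION & SPEC =====
def Spec_strip_c_comments (text : String) (out : String) : Prop := out = strip_c_comments_alt text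
instance (text : String) (out : String) : Decidable (Spec_strip_c_comments text out) := by unfold Spec_strip_c_comments; infer_instance

-- ===== CLAIM (what is proved, stated in full; the proofs are below) =====
def Claim_equal_strip_c_comments : Prop := ∀ (text : String), Dom_strip_c_comments text → Spec_strip_c_comments text (strip_c_comments text)

-- ===== LEMMAS AND PROOFS =====
-- A in 'string' state behaves like B's scanString followed by A back in the default state.
theorem string_state_eq (l : List Char) (q : Char) :
    stripALoop l .str (some q) false =
      (scanString l q).1 ++ stripALoop (scanString l q).2 .none (some q) false := by
  fun_induction scanString l q <;> simp_all [stripALoop]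

-- A in 'line_comment' state = drop to the newline and continue in the default state.
theorem line_state_eq (l : List Char) (q : Option Char) (e : Bool) :
    stripALoop l .line q e = stripALoop (l.dropWhile (· ≠ '\n')) .none q e := by
  induction l with
  | nil => simp [stripALoop]
  | cons c rest ih =>
    by_cases h : c = '\n'
    · subst h
      simp [stripALoop, List.dropWhile]
    · simp [stripALoop, h, List.dropWhile, ih]

-- A in 'block_comment' state = dropBlock and continue in the default state.
theorem block_state_eq (l : List Char) (q : Option Char) (e : Bool) :
    stripALoop l .block q e = stripALoop (dropBlock l) .none q e := by
  induction l with
  | nil => simp [stripALoop, dropBlock]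
  | cons c rest ih =>
    by_cases h : c = '*' ∧ rest.head? = some '/'
    · simp [stripALoop, dropBlock, h]
    · simp [stripALoop, dropBlock, h, ih]

-- Main loop equivalence, in A's default state (quote/escaped are dead there).
theorem main_eq (l : List Char) (q : Option Char) (e : Bool) :
    stripALoop l .none q e = stripBLoop l := by
  induction hn : l.length using Nat.strong_induction_on generalizing l q e with
  | _ n ih =>
  match l with
  | [] => simp [stripALoop, stripBLoop]
  | c :: rest =>
    by_cases hq : c = '"' ∨ c = '\''
    · have h1 := string_state_eq rest c
      have h2 := scanString_snd_length_le rest c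
      simp only [stripALoop, stripBLoop, if_pos hq, h1]
      congr 1
      congr 1
      exact ih (scanString rest c).2.length (by subst hn; simp; omega) _ _ _ rfl
    · by_cases hb : c = '/' ∧ rest.head? = some '*'
      · have hne : ¬ (c = '/' ∧ rest.head? = some '/') := by
          rintro ⟨_, h2⟩; rw [hb.2] at h2; simp at h2
        simp only [stripALoop, stripBLoop, if_neg hq, if_pos hb, if_neg hne]
        rw [block_state_eq]
        have h1 := dropBlock_length_le rest.tail
        have h2 : rest.tail.length ≤ rest.length := by simp [List.length_tail]
        exact ih (dropBlock rest.tail).length (by subst hn; simp; omega) _ _ _ rfl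
      · by_cases hl : c = '/' ∧ rest.head? = some '/'
        · simp only [stripALoop, stripBLoop, if_neg hq, if_neg hb, if_pos hl]
          rw [line_state_eq]
          have h1 := List.length_dropWhile_le (p := fun x => !decide (x = '\n')) (l := rest.tail)
          have h2 : rest.tail.length ≤ rest.length := by simp [List.length_tail]
          exact ih _ (by subst hn; simp at h1 ⊢; omega) _ _ _ rfl
        · simp only [stripALoop, stripBLoop, if_neg hq, if_neg hb, if_neg hl]
          congr 1
          exact ih rest.length (by subst hn; simp) _ _ _ rfl

-- ===== VERDICT (by name: the statement is the Claim_ definition above) =====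
theorem strip_c_comments_spec : Claim_equal_strip_c_comments := by
  intro text _
  unfold Spec_strip_c_comments strip_c_comments strip_c_comments_alt
  rw [main_eq]
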